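-- pv_equiv track=rewrite | github.com/ifSomeday/FlagBot | gpqSync.py | removeLeadingElements
-- ===== SOURCE A (Python) =====
-- def removeLeadingElements(arr, e=''):
--     out = []
--     start = False
--     for a in arr:
--         if not start and a == e:
--             continue
--         start = True
--         out.append(a)
--     return(out)
-- ===== SOURCE B (Python) =====
-- def removeLeadingElements(arr, e=''):
--     lst = list(arr)
--     k = 0
--     n = len(lst)
--     while k < n and lst[k] == e:
--         k += 1
--     return lst[k:]
-- ===== Notes on version B (the rewrite author's own statement) =====
-- stated objective: alternative
-- what changed: Two staged passes instead of a flag-guarded append loop: an index loop first finds the boundary k of the leading run equal to e, then the result is produced in one step as the slice lst[k:] (no per-element appends, no flag).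
import Mathlib
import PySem

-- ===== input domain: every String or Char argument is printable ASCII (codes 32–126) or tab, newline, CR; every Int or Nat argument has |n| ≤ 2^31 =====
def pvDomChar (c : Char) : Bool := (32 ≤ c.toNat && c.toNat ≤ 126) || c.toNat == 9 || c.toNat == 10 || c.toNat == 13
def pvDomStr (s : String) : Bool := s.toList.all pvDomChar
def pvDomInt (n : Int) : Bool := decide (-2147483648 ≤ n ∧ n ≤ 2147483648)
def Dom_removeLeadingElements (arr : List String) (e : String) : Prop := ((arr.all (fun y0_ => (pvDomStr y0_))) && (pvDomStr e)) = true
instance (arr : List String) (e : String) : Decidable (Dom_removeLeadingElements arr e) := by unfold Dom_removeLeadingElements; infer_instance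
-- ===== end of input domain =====

-- B replaces A's flag-guarded append loop by two staged passes: find the boundary k of the leading run, then return the slice lst[k:] (alternative decomposition, same cost).


-- ===== PORT A =====
-- Transliteration of A: fold over arr carrying (out, start)
def removeLeadingElements (arr : List String) (e : String) : List String :=
  (arr.foldl (fun (st : List String × Bool) a =>
      if !st.2 && a == e then st
      else (st.1 ++ [a], true)) ([], false)).1

-- ===== PORT B =====
-- B's while loop 'k < n and lst[k] == e: k += 1' as the obvious structural recursion computing k
def pvBoundary (lst : List String) (e : String) : Nat :=
  match lst with
  | [] => 0
  | a :: t => if a == e then pvBoundary t e + 1 else 0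

-- Transliteration of B: k := boundary; return lst[k:]
def removeLeadingElements_alt (arr : List String) (e : String) : List String :=
  PySem.List.slice arr (some (pvBoundary arr e : Int)) none

-- ===== PRECONDITION & SPEC =====
def Spec_removeLeadingElements (arr : List String) (e : String) (out : List String) : Prop := out = removeLeadingElements_alt arr e
instance (arr : List String) (e : String) (out : List String) : Decidable (Spec_removeLeadingElements arr e out) := by unfold Spec_removeLeadingElements; infer_instance

-- ===== CLAIM (what is proved, stated in full; the proofs are below) =====
def Claim_equal_removeLeadingElements : Prop := ∀ (arr : List String) (e : String), Dom_removeLeadingElements arr e → Spec_removeLeadingElements arr e (removeLeadingElements arr e)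

-- ===== LEMMAS AND PROOFS =====
-- Once started, A's fold appends every remaining element.
theorem foldA_started (arr : List String) (e : String) (acc : List String) :
    (arr.foldl (fun (st : List String × Bool) a =>
      if !st.2 && a == e then st
      else (st.1 ++ [a], true)) (acc, true)).1 = acc ++ arr := by
  induction arr generalizing acc with
  | nil => simp
  | cons h t ih =>
    rw [List.foldl_cons, if_neg (by simp)]
    rw [ih (acc ++ [h])]
    simp

theorem foldA_eq_drop_boundary (arr : List String) (e : String) :
    (arr.foldl (fun (st : List String × Bool) a =>
      if !st.2 && a == e then st
      else (st.1 ++ [a], true)) ([], false)).1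
    = arr.drop (pvBoundary arr e) := by
  induction arr with
  | nil => simp
  | cons h t ih =>
    by_cases hh : (h == e) = true
    · rw [List.foldl_cons, if_pos (by simp [hh])]
      rw [ih]
      simp [pvBoundary, hh]
    · rw [List.foldl_cons, if_neg (by simp [hh])]
      show (t.foldl _ ([h], true)).1 = _
      rw [foldA_started t e [h]]
      simp [pvBoundary, hh]

-- ===== VERDICT (by name: the statement is the Claim_ definition above) =====
theorem removeLeadingElements_spec : Claim_equal_removeLeadingElements := by
  intro arr e _
  unfold Spec_removeLeadingElements removeLeadingElements removeLeadingElements_alt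
  rw [PySem.List.slice_from_natCast]
  exact foldA_eq_drop_boundary arr e
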